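-- pv_equiv track=rewrite | github.com/lab11/M-ulator | platforms/m3/dlc_v1/numa_compiler/compiler/change_memory.py | pack_words
-- ===== SOURCE A (Python) =====
-- def pack_words(array):
--   new_array = []
--   new_int = 0
--   for i in range(0, len(array)):
--     if (i % 3 == 0):
--       new_int += array[i]
--     elif (i % 3 == 1):
--       new_int += array[i] * pow(2,32)
--     elif (i % 3 == 2):
--       new_int += array[i] * pow(2,32) * pow(2, 32)
--       new_array.append(new_int)
--       new_int = 0
--   return new_array
-- ===== SOURCE B (Python) =====
-- def pack_words(array):
--     it = iter(array)
--     return [a + b * 2**32 + c * 2**64 for a, b, c in zip(it, it, it)]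
-- ===== Notes on version B (the rewrite author's own statement) =====
-- stated objective: idiomatic
-- what changed: Replaces the index loop with an i % 3 state machine and running accumulator by zipping an iterator with itself to consume whole triples, packing each triple directly in a comprehension (incomplete trailing triples are dropped by zip, just as A drops them).
import Mathlib
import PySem

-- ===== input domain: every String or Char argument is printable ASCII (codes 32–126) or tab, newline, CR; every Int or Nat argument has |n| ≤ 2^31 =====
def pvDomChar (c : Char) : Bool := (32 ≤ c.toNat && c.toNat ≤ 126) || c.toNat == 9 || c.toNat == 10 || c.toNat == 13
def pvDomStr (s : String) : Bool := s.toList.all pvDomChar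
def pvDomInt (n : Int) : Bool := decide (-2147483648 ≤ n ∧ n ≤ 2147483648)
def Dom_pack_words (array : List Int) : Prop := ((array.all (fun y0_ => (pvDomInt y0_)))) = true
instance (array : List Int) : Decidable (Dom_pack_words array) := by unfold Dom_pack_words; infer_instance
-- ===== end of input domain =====

-- B replaces A's i % 3 state machine over indices by consuming the list three elements
-- at a time (zip of one iterator with itself), packing each triple directly; idiomatic, same cost.

-- ===== PORT A =====
-- index loop with i % 3 state machine; state = (new_array, new_int)
def pack_words (array : List Int) : List Int :=
  ((PySem.List.pyRange 0 (array.length : Int) 1).foldl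
    (fun (s : List Int × Int) i =>
      if PySem.Int.mod i 3 = 0 then (s.1, s.2 + PySem.List.pyGetD array i 0)
      else if PySem.Int.mod i 3 = 1 then (s.1, s.2 + PySem.List.pyGetD array i 0 * 2 ^ 32)
      else (s.1 ++ [s.2 + PySem.List.pyGetD array i 0 * 2 ^ 32 * 2 ^ 32], 0))
    ([], 0)).1

-- ===== PORT B =====
-- zip(it, it, it): structural recursion taking three elements at a time, remainder dropped
def pack_words_alt (array : List Int) : List Int :=
  match array with
  | a :: b :: c :: rest => (a + b * 2 ^ 32 + c * 2 ^ 64) :: pack_words_alt rest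
  | _ => []

-- ===== PRECONDITION & SPEC =====
def Spec_pack_words (array : List Int) (out : List Int) : Prop := out = pack_words_alt array
instance (array : List Int) (out : List Int) : Decidable (Spec_pack_words array out) := by unfold Spec_pack_words; infer_instance

-- ===== CLAIM (what is proved, stated in full; the proofs are below) =====
def Claim_equal_pack_words : Prop := ∀ (array : List Int), Dom_pack_words array → Spec_pack_words array (pack_words array)

-- ===== LEMMAS AND PROOFS =====

theorem pack_words_loop_eq : ∀ (rest array : List Int) (k : Nat) (acc : List Int),
    array.length = 3 * k + rest.length → array.drop (3 * k) = rest →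
    ((PySem.List.pyRange ((3 * k : Nat) : Int) (array.length : Int) 1).foldl
      (fun (s : List Int × Int) i =>
        if PySem.Int.mod i 3 = 0 then (s.1, s.2 + PySem.List.pyGetD array i 0)
        else if PySem.Int.mod i 3 = 1 then (s.1, s.2 + PySem.List.pyGetD array i 0 * 2 ^ 32)
        else (s.1 ++ [s.2 + PySem.List.pyGetD array i 0 * 2 ^ 32 * 2 ^ 32], 0))
      (acc, 0)).1 = acc ++ pack_words_alt rest := by
  intro rest
  induction rest using pack_words_alt.induct with
  | case1 a b c rest' ih =>
    intro array k acc hk hd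
    have hL : array.length = 3 * k + (rest'.length + 3) := by simp at hk; omega
    -- the three elements
    have e0 : PySem.List.pyGetD array ((3 * k : Nat) : Int) 0 = a := by
      rw [PySem.List.pyGetD_eq_getElem array 0 (by positivity) (by exact_mod_cast (by omega : 3*k < array.length))]
      have : (array.drop (3*k))[0]'(by rw [hd]; simp) = a := by simp [hd]
      rw [List.getElem_drop] at this; simpa using this
    have e1 : PySem.List.pyGetD array (((3 * k : Nat) : Int) + 1) 0 = b := by
      have h1 : (((3 * k : Nat) : Int) + 1) = ((3*k+1 : Nat) : Int) := by push_cast; ring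
      rw [h1, PySem.List.pyGetD_eq_getElem array 0 (by positivity) (by exact_mod_cast (by omega : 3*k+1 < array.length))]
      have : (array.drop (3*k))[1]'(by rw [hd]; simp) = b := by simp [hd]
      rw [List.getElem_drop] at this; simpa using this
    have e2 : PySem.List.pyGetD array (((3 * k : Nat) : Int) + 1 + 1) 0 = c := by
      have h1 : (((3 * k : Nat) : Int) + 1 + 1) = ((3*k+2 : Nat) : Int) := by push_cast; ring
      rw [h1, PySem.List.pyGetD_eq_getElem array 0 (by positivity) (by exact_mod_cast (by omega : 3*k+2 < array.length))]
      have : (array.drop (3*k))[2]'(by rw [hd]; simp) = c := by simp [hd]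
      rw [List.getElem_drop] at this; simpa using this
    -- unroll three loop steps
    rw [PySem.List.pyRange_one_cons (by exact_mod_cast (by omega : (3*k:Int) < (array.length:Int)))]
    rw [PySem.List.pyRange_one_cons (by push_cast; omega)]
    rw [PySem.List.pyRange_one_cons (by push_cast; omega)]
    simp only [List.foldl_cons]
    rw [PySem.Int.mod_eq_emod_of_pos (by norm_num), PySem.Int.mod_eq_emod_of_pos (by norm_num),
        PySem.Int.mod_eq_emod_of_pos (by norm_num)]
    have m0 : (((3 * k : Nat) : Int)) % 3 = 0 := by push_cast; omega
    have m1 : (((3 * k : Nat) : Int) + 1) % 3 = 1 := by push_cast; omega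
    have m2 : (((3 * k : Nat) : Int) + 1 + 1) % 3 = 2 := by push_cast; omega
    rw [m0, m1, m2]
    simp only [reduceIte, e0, e1, e2]
    simp only [if_neg (by norm_num : ¬((1:Int)=0)), if_neg (by norm_num : ¬((2:Int)=0)),
      if_neg (by norm_num : ¬((2:Int)=1))]
    have hs : (((3 * k : Nat) : Int) + 1 + 1 + 1) = ((3 * (k+1) : Nat) : Int) := by push_cast; ring
    rw [hs]
    have hdrop : array.drop (3 * (k+1)) = rest' := by
      have : array.drop (3*(k+1)) = (array.drop (3*k)).drop 3 := by
        rw [List.drop_drop]; ring_nf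
      rw [this, hd]; simp
    rw [ih array (k+1) (acc ++ [0 + a + b * 2 ^ 32 + c * 2 ^ 32 * 2 ^ 32]) (by omega) hdrop]
    show acc ++ [0 + a + b * 2 ^ 32 + c * 2 ^ 32 * 2 ^ 32] ++ pack_words_alt rest'
        = acc ++ pack_words_alt (a :: b :: c :: rest')
    simp [pack_words_alt, List.append_assoc]
    ring
  | case2 t hne =>
    intro array k acc hk hd
    rcases t with _ | ⟨a, _ | ⟨b, _ | ⟨c, rest'⟩⟩⟩
    · rw [PySem.List.pyRange_one_eq_nil (by simp at hk ⊢; omega)]; simp [pack_words_alt]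
    · -- one leftover element
      rw [PySem.List.pyRange_one_cons (by exact_mod_cast (by simp at hk; omega : (3*k:Int) < (array.length:Int)))]
      rw [PySem.List.pyRange_one_eq_nil (by push_cast; simp at hk; omega)]
      simp only [List.foldl_cons, List.foldl_nil]
      rw [PySem.Int.mod_eq_emod_of_pos (by norm_num)]
      have m0 : (((3 * k : Nat) : Int)) % 3 = 0 := by push_cast; omega
      rw [m0]; simp [pack_words_alt]
    · rw [PySem.List.pyRange_one_cons (by exact_mod_cast (by simp at hk; omega : (3*k:Int) < (array.length:Int)))]
      rw [PySem.List.pyRange_one_cons (by push_cast; simp at hk; omega)]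
      rw [PySem.List.pyRange_one_eq_nil (by push_cast; simp at hk; omega)]
      simp only [List.foldl_cons, List.foldl_nil]
      rw [PySem.Int.mod_eq_emod_of_pos (by norm_num), PySem.Int.mod_eq_emod_of_pos (by norm_num)]
      have m0 : (((3 * k : Nat) : Int)) % 3 = 0 := by push_cast; omega
      have m1 : (((3 * k : Nat) : Int) + 1) % 3 = 1 := by push_cast; omega
      rw [m0, m1]; simp [pack_words_alt]
    · exact absurd rfl (hne a b c rest')

-- ===== VERDICT (by name: the statement is the Claim_ definition above) =====
theorem pack_words_spec : Claim_equal_pack_words := by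
  intro array _
  unfold Spec_pack_words pack_words
  have h := pack_words_loop_eq array array 0 [] (by simp) (by simp)
  simpa using h
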